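-- pv_equiv track=rewrite | github.com/iMeisa/CodeWars | eliminationTournament/tourney.py | tourney
-- ===== SOURCE A (Python) =====
-- def tourney(inp):
--     plays = [inp[:]]
--     while len(inp) > 1:
--         next_round = []
--         if len(inp) % 2 != 0:
--             next_round.append(inp[-1])
--             inp.pop(-1)
--
--         while len(inp) > 1:
--             next_round.append(max(inp[0], inp[1]))
--             inp.pop(0)
--             inp.pop(0)
--
--         plays.append(next_round[:])
--         inp = next_round
--
--     return plays
-- ===== SOURCE B (Python) =====
-- def tourney(inp):
--     if len(inp) <= 1:
--         return [inp[:]]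
--     nxt = ([inp[-1]] if len(inp) % 2 else []) + \
--           [max(inp[2 * i], inp[2 * i + 1]) for i in range(len(inp) // 2)]
--     return [inp[:]] + tourney(nxt)
-- ===== Notes on version B (the rewrite author's own statement) =====
-- stated objective: faster
-- what changed: A's destructive outer/inner while loops that pop(0) from the list are replaced by a direct recursion over the round reduction, each round built as a pairwise-max comprehension over range(len//2) (plus the lone odd element in front); B also leaves the caller's list unmutated while A empties it in place.
import Mathlib
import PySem

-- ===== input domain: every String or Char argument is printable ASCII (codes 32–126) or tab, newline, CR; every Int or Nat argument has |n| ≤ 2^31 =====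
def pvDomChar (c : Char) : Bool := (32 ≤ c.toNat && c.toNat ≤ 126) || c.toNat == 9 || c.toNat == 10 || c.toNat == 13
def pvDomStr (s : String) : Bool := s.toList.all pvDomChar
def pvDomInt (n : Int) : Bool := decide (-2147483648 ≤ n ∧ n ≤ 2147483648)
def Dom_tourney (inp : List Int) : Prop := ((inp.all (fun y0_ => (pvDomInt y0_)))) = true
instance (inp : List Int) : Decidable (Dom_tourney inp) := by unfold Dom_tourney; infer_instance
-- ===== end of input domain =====

-- B replaces A's destructive double-while pop loop by a direct recursion on the round reduction
-- (odd leftover + pairwise-max comprehension); objective: simpler.  Equivalence is about the RETURN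
-- value only: Python A empties the caller's list in place, B does not mutate it.

-- ===== PORT A =====
-- inner 'while len(inp) > 1: next_round.append(max(inp[0], inp[1])); inp.pop(0); inp.pop(0)'
def tourneyInner (inp : List Int) (next_round : List Int) : List Int :=
  match inp with
  | a :: b :: rest => tourneyInner rest (next_round ++ [max a b])
  | _ => next_round

-- used by tourneyLoop's decreasing_by
theorem tourneyInner_length (inp next_round : List Int) :
    (tourneyInner inp next_round).length = next_round.length + inp.length / 2 := by
  match inp with
  | a :: b :: rest =>
    rw [show tourneyInner (a :: b :: rest) next_round
          = tourneyInner rest (next_round ++ [max a b]) from rfl,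
        tourneyInner_length rest (next_round ++ [max a b])]
    simp; omega
  | [] => simp [tourneyInner]
  | [a] => simp [tourneyInner]
termination_by inp.length

-- outer 'while len(inp) > 1' with the 'plays' accumulator
def tourneyLoop (inp : List Int) (plays : List (List Int)) : List (List Int) :=
  if inp.length > 1 then
    let p : List Int × List Int :=
      if inp.length % 2 ≠ 0 then ([(PySem.List.pyGet? inp (-1)).getD 0], inp.dropLast)
      else ([], inp)
    let next := tourneyInner p.2 p.1
    tourneyLoop next (plays ++ [next])
  else plays
termination_by inp.length
decreasing_by
  simp only [tourneyInner_length]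
  split <;> simp <;> omega

def tourney (inp : List Int) : List (List Int) := tourneyLoop inp [inp]

-- ===== PORT B =====
def tourney_alt (inp : List Int) : List (List Int) :=
  if inp.length ≤ 1 then [inp]
  else
    let nxt :=
      (if inp.length % 2 ≠ 0 then [(PySem.List.pyGet? inp (-1)).getD 0] else []) ++
      (PySem.List.pyRange 0 (PySem.Int.floordiv (inp.length : Int) 2)).map
        (fun i => max (PySem.List.pyGetD inp (2 * i) 0) (PySem.List.pyGetD inp (2 * i + 1) 0))
    [inp] ++ tourney_alt nxt
termination_by inp.length
decreasing_by
  simp only [List.length_append, PySem.List.length_pyRange_one, List.length_map,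
    PySem.Int.floordiv, Int.fdiv_eq_ediv]
  split <;> simp <;> omega

-- ===== PRECONDITION & SPEC =====
def Spec_tourney (inp : List Int) (out : List (List Int)) : Prop := out = tourney_alt inp
instance (inp : List Int) (out : List (List Int)) : Decidable (Spec_tourney inp out) := by unfold Spec_tourney; infer_instance

-- ===== CLAIM (what is proved, stated in full; the proofs are below) =====
def Claim_equal_tourney : Prop := ∀ (inp : List Int), Dom_tourney inp → Spec_tourney inp (tourney inp)

-- ===== LEMMAS AND PROOFS =====

-- pairwise maxima, dropping a lone leftover element
def pairMax : List Int → List Int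
  | a :: b :: rest => max a b :: pairMax rest
  | _ => []

theorem tourneyInner_eq (inp acc : List Int) : tourneyInner inp acc = acc ++ pairMax inp := by
  match inp with
  | a :: b :: rest =>
    rw [show tourneyInner (a :: b :: rest) acc = tourneyInner rest (acc ++ [max a b]) from rfl,
        tourneyInner_eq rest (acc ++ [max a b])]
    simp [pairMax]
  | [] => simp [tourneyInner, pairMax]
  | [a] => simp [tourneyInner, pairMax]
termination_by inp.length

theorem pairMax_dropLast (l : List Int) (h : l.length % 2 = 1) :
    pairMax l.dropLast = pairMax l := by
  match l with
  | [] => simp at h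
  | [a] => simp [pairMax]
  | a :: b :: rest =>
    have hr : rest.length % 2 = 1 := by simp only [List.length_cons] at h; omega
    have hne : rest ≠ [] := by intro e; rw [e] at hr; simp at hr
    have hd : (a :: b :: rest).dropLast = a :: b :: rest.dropLast := by
      cases rest with
      | nil => exact absurd rfl hne
      | cons c t => simp
    rw [hd]
    simp [pairMax, pairMax_dropLast rest hr]
termination_by l.length

-- B's comprehension over range(len(inp) // 2) computes pairMax
theorem mapRange_eq (k : Nat) (l : List Int) (hk : l.length / 2 = k) :
    (PySem.List.pyRange 0 (k : Int)).map
      (fun i => max (PySem.List.pyGetD l (2 * i) 0) (PySem.List.pyGetD l (2 * i + 1) 0))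
    = pairMax l := by
  induction k generalizing l with
  | zero =>
    rw [PySem.List.pyRange_one]
    match l with
    | [] => simp [pairMax]
    | [a] => simp [pairMax]
    | a :: b :: rest => simp only [List.length_cons] at hk; omega
  | succ k ih =>
    match l with
    | [] => simp only [List.length_nil] at hk; omega
    | [a] => simp only [List.length_cons, List.length_nil] at hk; omega
    | a :: b :: rest =>
      rw [PySem.List.pyRange_one_cons (by positivity), List.map_cons]
      have h1 : PySem.List.pyRange 1 ((k : Int) + 1) =
          (PySem.List.pyRange 0 (k : Int)).map (· + 1) := by
        rw [PySem.List.pyRange_one, PySem.List.pyRange_one, List.map_map]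
        have he : ((k : Int) + 1 - 1).toNat = ((k : Int) - 0).toNat := by omega
        rw [he]
        exact List.map_congr_left (fun j _ => by simp [add_comm])
      push_cast
      rw [h1, List.map_map]
      have h2 : ∀ i ∈ PySem.List.pyRange 0 (k : Int),
          ((fun i => max (PySem.List.pyGetD (a :: b :: rest) (2 * i) 0)
              (PySem.List.pyGetD (a :: b :: rest) (2 * i + 1) 0)) ∘ (· + 1)) i
          = max (PySem.List.pyGetD rest (2 * i) 0) (PySem.List.pyGetD rest (2 * i + 1) 0) := by
        intro i hi
        have h0 : 0 ≤ i := (PySem.List.mem_pyRange_one.mp hi).1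
        obtain ⟨n, rfl⟩ := Int.eq_ofNat_of_zero_le h0
        have e1 : 2 * ((n : Int) + 1) = ((2 * n + 2 : Nat) : Int) := by push_cast; ring
        have e2 : 2 * ((n : Int) + 1) + 1 = ((2 * n + 3 : Nat) : Int) := by push_cast; ring
        have e3 : 2 * (n : Int) = ((2 * n : Nat) : Int) := by push_cast; ring
        have e4 : 2 * (n : Int) + 1 = ((2 * n + 1 : Nat) : Int) := by push_cast; ring
        simp only [Function.comp_apply]
        rw [e2, e1, e4, e3]
        simp only [PySem.List.pyGetD_natCast]
        simp [List.getD]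
      rw [List.map_congr_left h2, ih rest (by simp only [List.length_cons] at hk; omega)]
      have hA : PySem.List.pyGetD (a :: b :: rest) 0 0 = a := by
        rw [show (0 : Int) = ((0 : Nat) : Int) by norm_num, PySem.List.pyGetD_natCast]; rfl
      have hB : PySem.List.pyGetD (a :: b :: rest) 1 0 = b := by
        rw [show (1 : Int) = ((1 : Nat) : Int) by norm_num, PySem.List.pyGetD_natCast]; rfl
      rw [hA, hB]
      rfl

-- tourney_alt always begins with its argument
theorem tourney_alt_head (l : List Int) : tourney_alt l = l :: (tourney_alt l).tail := by
  rw [tourney_alt]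
  split <;> simp

-- A's round step equals B's round step (length > 1)
theorem next_eq (l : List Int) (_h : 1 < l.length) :
    tourneyInner (if l.length % 2 ≠ 0 then ([(PySem.List.pyGet? l (-1)).getD 0], l.dropLast)
        else (([] : List Int), l)).2
      (if l.length % 2 ≠ 0 then ([(PySem.List.pyGet? l (-1)).getD 0], l.dropLast)
        else (([] : List Int), l)).1
    = (if l.length % 2 ≠ 0 then [(PySem.List.pyGet? l (-1)).getD 0] else []) ++
      (PySem.List.pyRange 0 (PySem.Int.floordiv (l.length : Int) 2)).map
        (fun i => max (PySem.List.pyGetD l (2 * i) 0) (PySem.List.pyGetD l (2 * i + 1) 0)) := by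
  have hfd : PySem.Int.floordiv (l.length : Int) 2 = ((l.length / 2 : Nat) : Int) := by
    simp only [PySem.Int.floordiv, Int.fdiv_eq_ediv]
    omega
  rw [hfd, mapRange_eq (l.length / 2) l rfl]
  by_cases hodd : l.length % 2 = 0
  · simp [hodd, tourneyInner_eq]
  · have h1 : l.length % 2 = 1 := by omega
    simp [hodd, tourneyInner_eq, pairMax_dropLast l h1]

theorem loop_eq (n : Nat) (l : List Int) (plays : List (List Int)) (hn : l.length ≤ n) :
    tourneyLoop l plays = plays ++ (tourney_alt l).tail := by
  induction n generalizing l plays with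
  | zero =>
    rw [tourneyLoop, tourney_alt]
    simp only [show ¬ l.length > 1 by omega, if_neg, not_false_iff,
      show l.length ≤ 1 by omega, if_pos]
    simp
  | succ n ih =>
    by_cases h : 1 < l.length
    · rw [tourneyLoop]
      simp only [gt_iff_lt, h, if_pos]
      rw [next_eq l h]
      set nxt := (if l.length % 2 ≠ 0 then [(PySem.List.pyGet? l (-1)).getD 0] else []) ++
        (PySem.List.pyRange 0 (PySem.Int.floordiv (l.length : Int) 2)).map
          (fun i => max (PySem.List.pyGetD l (2 * i) 0) (PySem.List.pyGetD l (2 * i + 1) 0)) with hnxt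
      have hlen : nxt.length ≤ n := by
        rw [hnxt]
        simp only [List.length_append, PySem.List.length_pyRange_one, List.length_map,
          PySem.Int.floordiv, Int.fdiv_eq_ediv]
        split <;> simp <;> omega
      rw [ih nxt (plays ++ [nxt]) hlen]
      conv_rhs => rw [tourney_alt]
      simp only [show ¬ l.length ≤ 1 by omega, if_neg, not_false_iff]
      rw [← hnxt]
      conv_rhs => rw [tourney_alt_head nxt]
      simp
    · rw [tourneyLoop, tourney_alt]
      simp only [show ¬ l.length > 1 by omega, if_neg, not_false_iff,
        show l.length ≤ 1 by omega, if_pos]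
      simp

-- ===== VERDICT (by name: the statement is the Claim_ definition above) =====
theorem tourney_spec : Claim_equal_tourney := by
  intro inp _
  unfold Spec_tourney tourney
  rw [loop_eq inp.length inp [inp] le_rfl]
  conv_rhs => rw [tourney_alt_head inp]
  simp
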